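-- pv_equiv track=rewrite | github.com/CocoMarck/modulosUtilPy | logic/Modulo_Text.py | pass_text_filter
-- ===== SOURCE A (Python) =====
-- def pass_text_filter(text=None,filter=None) -> bool:
--     '''
--     Devolver si el texto pasa el filtro
--     Los parametros deben ser strings
--
--     filter=str,text=str
--     return bool
--
--     Ejemplo:
--     filtro = '123'
--     text = '312'
--     Final: go = True
--
--     filtro = '123'
--     text = '312.2'
--     Final: go = False
--     '''
--     # Diccionario de caracteres del texto, para saber si el caracter paso el filtro
--     dict_text = {}
--
--     # Bucle por caracter del texto
--     number = 0
--     for character_text in text: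
--         number += 1
--         # Bucle por caracter en el filtro
--         # Si el caracter del texto es igual al caracter del filtro, pasa el filtro
--         go =  False
--         for character_filter in filter:
--             if character_text == character_filter:
--                 go = True
--
--         dict_text.update( {f'{number}. {character_text}' : go} )
--
--
--     # Evaluar si todos los caracteres pasaron el filtro
--     go = True
--     for key in dict_text.keys():
--         if dict_text[key] == False:
--             go = False
--
--
--     return go
-- ===== SOURCE B (Python) =====
-- def pass_text_filter(text=None, filter=None) -> bool:
--     '''Same result as A: every character of text must occur in filter
--     (empty text always passes). Re-implemented as a set-subset test.'''
--     chars = set(text)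
--     if not chars:
--         return True
--     return chars <= set(filter)
-- ===== Notes on version B (the rewrite author's own statement) =====
-- stated objective: simpler
-- what changed: Replaces the per-position dict built by two nested loops plus a final verification pass over the dict keys with a single set-subset test set(text) <= set(filter).
import Mathlib
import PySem

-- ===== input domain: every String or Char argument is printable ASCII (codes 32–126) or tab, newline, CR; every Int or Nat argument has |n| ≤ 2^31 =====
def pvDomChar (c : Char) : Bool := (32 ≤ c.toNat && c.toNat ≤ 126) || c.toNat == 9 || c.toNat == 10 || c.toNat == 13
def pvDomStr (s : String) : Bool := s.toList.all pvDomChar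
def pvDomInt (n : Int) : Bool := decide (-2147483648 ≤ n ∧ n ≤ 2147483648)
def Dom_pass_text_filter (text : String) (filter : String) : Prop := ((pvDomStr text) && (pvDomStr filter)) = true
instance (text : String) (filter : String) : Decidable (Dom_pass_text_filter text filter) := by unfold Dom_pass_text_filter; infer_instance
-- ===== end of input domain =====

-- B replaces A's per-position dict and nested loops with a single set-subset test; same return value.

-- ===== PORT A =====
-- the f-string key f'{number}. {character_text}', as a list of chars (PySem.Int.toChars = str(number))
def pvKey (n : Int) (c : Char) : List Char := PySem.Int.toChars n ++ ['.', ' ', c]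

def pass_text_filter (text : String) (filter : String) : Bool :=
  -- number/dict loop over the text; inner loop over the filter
  let st := text.toList.foldl
    (fun (st : Int × PySem.Dict (List Char) Bool) character_text =>
      (st.1 + 1,
       st.2.insert (pvKey (st.1 + 1) character_text)
         (filter.toList.foldl
           (fun go character_filter => if character_text == character_filter then true else go)
           false)))
    (0, PySem.Dict.empty)
  -- final loop: dict_text[key] with key drawn from dict_text.keys() never misses, ported as getD
  st.2.keys.foldl (fun go key => if st.2.getD key false == false then false else go) true

-- ===== PORT B =====
def pass_text_filter_alt (text : String) (filter : String) : Bool :=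
  let chars : PySem.Set Char := PySem.Set.ofList text.toList
  if chars.isEmpty then true
  else PySem.Set.issubset chars (PySem.Set.ofList filter.toList)

-- ===== PRECONDITION & SPEC =====
def Spec_pass_text_filter (text : String) (filter : String) (out : Bool) : Prop := out = pass_text_filter_alt text filter
instance (text : String) (filter : String) (out : Bool) : Decidable (Spec_pass_text_filter text filter out) := by unfold Spec_pass_text_filter; infer_instance

-- ===== CLAIM (what is proved, stated in full; the proofs are below) =====
def Claim_equal_pass_text_filter : Prop := ∀ (text : String) (filter : String), Dom_pass_text_filter text filter → Spec_pass_text_filter text filter (pass_text_filter text filter)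

-- ===== LEMMAS AND PROOFS =====

-- str(n) for n ≥ 0, restated as a structural recursion we can reason about
def pvDigits (n : Nat) : List Char :=
  if _h : n < 10 then [Nat.digitChar n]
  else pvDigits (n / 10) ++ [Nat.digitChar (n % 10)]
decreasing_by exact Nat.div_lt_self (by omega) (by omega)

theorem pvDigits_eq_lt {n : Nat} (h : n < 10) : pvDigits n = [Nat.digitChar n] := by
  rw [pvDigits]; rw [dif_pos h]

theorem pvDigits_eq_ge {n : Nat} (h : ¬ n < 10) :
    pvDigits n = pvDigits (n / 10) ++ [Nat.digitChar (n % 10)] := by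
  rw [pvDigits]; rw [dif_neg h]

theorem pvToDigitsCore_eq : ∀ (f n : Nat) (acc : List Char), n < f →
    Nat.toDigitsCore 10 f n acc = pvDigits n ++ acc := by
  intro f
  induction f with
  | zero => intro n acc h; omega
  | succ f ih =>
    intro n acc h
    rw [Nat.toDigitsCore]
    by_cases h10 : n < 10
    · have hz : n / 10 = 0 := Nat.div_eq_of_lt h10
      rw [hz, if_pos rfl, pvDigits_eq_lt h10, Nat.mod_eq_of_lt h10]
      rfl
    · have hne : n / 10 ≠ 0 := by omega
      rw [if_neg hne, ih (n / 10) _ (by omega), pvDigits_eq_ge h10]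
      simp

theorem pvToDigits_eq (n : Nat) : Nat.toDigits 10 n = pvDigits n := by
  rw [Nat.toDigits]
  rw [pvToDigitsCore_eq (n + 1) n [] (by omega)]
  simp

theorem pvDigits_length_pos (n : Nat) : 1 ≤ (pvDigits n).length := by
  by_cases h : n < 10
  · rw [pvDigits_eq_lt h]; simp
  · rw [pvDigits_eq_ge h]; simp

theorem pvDigitChar_inj : ∀ d < 10, ∀ e < 10, Nat.digitChar d = Nat.digitChar e → d = e := by decide

theorem pvDigits_inj : ∀ m n : Nat, pvDigits m = pvDigits n → m = n := by
  intro m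
  induction m using Nat.strong_induction_on with
  | _ m ih =>
    intro n h
    by_cases hm : m < 10 <;> by_cases hn : n < 10
    · rw [pvDigits_eq_lt hm, pvDigits_eq_lt hn] at h
      exact pvDigitChar_inj m hm n hn (by simpa using h)
    · rw [pvDigits_eq_lt hm, pvDigits_eq_ge hn] at h
      have hlen := congrArg List.length h
      have hpos := pvDigits_length_pos (n / 10)
      simp only [List.length_append, List.length_cons, List.length_nil] at hlen
      omega
    · rw [pvDigits_eq_ge hm, pvDigits_eq_lt hn] at h
      have hlen := congrArg List.length h
      have hpos := pvDigits_length_pos (m / 10)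
      simp only [List.length_append, List.length_cons, List.length_nil] at hlen
      omega
    · rw [pvDigits_eq_ge hm, pvDigits_eq_ge hn] at h
      have hlen : ([Nat.digitChar (m % 10)] : List Char).length = ([Nat.digitChar (n % 10)] : List Char).length := rfl
      obtain ⟨h1, h2⟩ := List.append_inj' h hlen
      have hdiv : m / 10 = n / 10 :=
        ih (m / 10) (Nat.div_lt_self (by omega) (by omega)) _ h1
      have hmod : m % 10 = n % 10 :=
        pvDigitChar_inj _ (Nat.mod_lt _ (by omega)) _ (Nat.mod_lt _ (by omega)) (by simpa using h2)
      omega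

theorem pvKey_inj {m n : Int} (hm : 0 ≤ m) (hn : 0 ≤ n) {c c' : Char}
    (h : pvKey m c = pvKey n c') : m = n := by
  unfold pvKey at h
  unfold PySem.Int.toChars at h
  rw [if_neg (by omega), if_neg (by omega)] at h
  rw [pvToDigits_eq, pvToDigits_eq] at h
  have hlen : (['.', ' ', c] : List Char).length = (['.', ' ', c'] : List Char).length := rfl
  obtain ⟨h1, _⟩ := List.append_inj' h hlen
  have := pvDigits_inj _ _ h1
  omega

-- A's loop restated as a named step function (definitionally equal to the port's lambda)
def pvStep (fs : List Char) : (Int × PySem.Dict (List Char) Bool) → Char → (Int × PySem.Dict (List Char) Bool) :=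
  fun st character_text =>
    (st.1 + 1,
     st.2.insert (pvKey (st.1 + 1) character_text)
       (fs.foldl (fun go character_filter => if character_text == character_filter then true else go) false))

theorem pvInner_eq (c : Char) : ∀ (fs : List Char) (b : Bool),
    fs.foldl (fun go cf => if c == cf then true else go) b = (b || fs.contains c) := by
  intro fs
  induction fs with
  | nil => intro b; simp
  | cons f fs ih =>
    intro b
    rw [List.foldl_cons, ih]
    by_cases h : c = f
    · subst h; simp
    · have hb : (c == f) = false := by simpa using h
      simp [hb, h]

-- the (key, value) pairs A's loop appends when started at counter n
def pvTail (fs : List Char) : Int → List Char → List (List Char × Bool)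
  | _, [] => []
  | n, c :: cs => (pvKey (n + 1) c, fs.contains c) :: pvTail fs (n + 1) cs

theorem pvLoop_items (fs : List Char) : ∀ (cs : List Char) (n : Int) (d : PySem.Dict (List Char) Bool),
    0 ≤ n → (∀ k ∈ d.keys, ∃ m c, 0 ≤ m ∧ m ≤ n ∧ k = pvKey m c) →
    (cs.foldl (pvStep fs) (n, d)).2.items = d.items ++ pvTail fs n cs := by
  intro cs
  induction cs with
  | nil => intro n d _ _; simp [pvTail]
  | cons c cs ih =>
    intro n d hn hkeys
    have hfresh : d.contains (pvKey (n + 1) c) = false := by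
      by_contra hc
      have : d.contains (pvKey (n + 1) c) = true := by
        cases h : d.contains (pvKey (n + 1) c) <;> simp_all
      have hmem := (PySem.Dict.contains_iff_mem_keys d (pvKey (n + 1) c)).mp this
      obtain ⟨m, c', hm0, hmn, hk⟩ := hkeys _ hmem
      have := pvKey_inj hm0 (by omega) hk.symm
      omega
    simp only [List.foldl_cons]
    have hstep : pvStep fs (n, d) c =
        (n + 1, d.insert (pvKey (n + 1) c) (fs.contains c)) := by
      unfold pvStep
      rw [pvInner_eq c fs false]
      simp
    rw [hstep]
    rw [ih (n + 1) _ (by omega) ?_]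
    · rw [PySem.Dict.items_insert_of_not_contains _ _ hfresh]
      simp [pvTail]
    · intro k hk
      rcases (PySem.Dict.mem_keys_insert _ _ _ _).mp hk with h | h
      · exact ⟨n + 1, c, by omega, le_refl _, h⟩
      · obtain ⟨m, c', hm0, hmn, hk'⟩ := hkeys _ h
        exact ⟨m, c', hm0, by omega, hk'⟩

theorem pvLoop_nodup (fs : List Char) : ∀ (cs : List Char) (n : Int) (d : PySem.Dict (List Char) Bool),
    d.keys.Nodup → (cs.foldl (pvStep fs) (n, d)).2.keys.Nodup := by
  intro cs
  induction cs with
  | nil => intro n d h; exact h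
  | cons c cs ih =>
    intro n d h
    simp only [List.foldl_cons]
    exact ih _ _ (PySem.Dict.nodup_keys_insert _ _ _ h)

theorem pvFinal_eq (d : PySem.Dict (List Char) Bool) : ∀ (l : List (List Char)) (b : Bool),
    l.foldl (fun go key => if d.getD key false == false then false else go) b =
    (b && l.all (fun k => d.getD k false)) := by
  intro l
  induction l with
  | nil => intro b; simp
  | cons k l ih =>
    intro b
    simp only [List.foldl_cons, ih, List.all_cons]
    cases d.getD k false
    · simp
    · simp

theorem pvTail_snd (fs : List Char) : ∀ (cs : List Char) (n : Int),
    (pvTail fs n cs).map (·.2) = cs.map (fun c => fs.contains c) := by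
  intro cs
  induction cs with
  | nil => intro n; simp [pvTail]
  | cons c cs ih => intro n; simp [pvTail, ih]

theorem pvA_eq (text filter : String) :
    pass_text_filter text filter = text.toList.all (fun c => filter.toList.contains c) := by
  show (let st := text.toList.foldl (pvStep filter.toList) (0, PySem.Dict.empty);
        st.2.keys.foldl (fun go key => if st.2.getD key false == false then false else go) true) = _
  set d := (text.toList.foldl (pvStep filter.toList) (0, PySem.Dict.empty)).2 with hd
  have hitems : d.items = pvTail filter.toList 0 text.toList := by
    rw [hd, pvLoop_items filter.toList text.toList 0 PySem.Dict.empty (by omega)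
      (by intro k hk; simp [PySem.Dict.keys_empty] at hk)]
    simp [show PySem.Dict.empty.items = ([] : List (List Char × Bool)) from rfl]
  have hnd : d.keys.Nodup := by
    rw [hd]
    exact pvLoop_nodup _ _ _ _ (by simp [PySem.Dict.keys_empty])
  simp only []
  rw [pvFinal_eq]
  have hvals : d.values = d.keys.map (fun k => d.getD k false) :=
    PySem.Dict.values_eq_map_keys d hnd false
  have hall : d.keys.all (fun k => d.getD k false) = d.values.all id := by
    rw [hvals, List.all_map]
    rfl
  rw [Bool.true_and, hall]
  have hv2 : d.values = text.toList.map (fun c => filter.toList.contains c) := by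
    have : d.values = d.items.map (·.2) := rfl
    rw [this, hitems, pvTail_snd]
  rw [hv2, List.all_map]
  rfl

theorem pvOfList_nil_iff {α : Type} [BEq α] [LawfulBEq α] (xs : List α) :
    PySem.Set.ofList xs = ([] : List α) ↔ xs = [] := by
  constructor
  · intro h
    cases xs with
    | nil => rfl
    | cons x xs => rw [PySem.Set.ofList_cons] at h; simp at h
  · intro h; rw [h]; rfl

theorem pvB_eq (text filter : String) :
    pass_text_filter_alt text filter = text.toList.all (fun c => filter.toList.contains c) := by
  unfold pass_text_filter_alt
  simp only []
  by_cases h : (PySem.Set.ofList text.toList).isEmpty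
  · rw [if_pos h]
    have : text.toList = [] := (pvOfList_nil_iff _).mp (List.isEmpty_iff.mp h)
    rw [this]
    rfl
  · rw [if_neg h]
    have hiff := PySem.Set.issubset_iff (PySem.Set.ofList text.toList) (PySem.Set.ofList filter.toList)
    rw [Bool.eq_iff_iff, hiff, List.all_eq_true]
    constructor
    · intro hsub c hc
      have := hsub c ((PySem.Set.mem_ofList _ _).mpr hc)
      simp only [List.contains_eq_mem]
      exact decide_eq_true ((PySem.Set.mem_ofList _ _).mp this)
    · intro hall x hx
      have := hall x ((PySem.Set.mem_ofList _ _).mp hx)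
      simp only [List.contains_eq_mem] at this
      exact (PySem.Set.mem_ofList _ _).mpr (of_decide_eq_true this)

-- ===== VERDICT (by name: the statement is the Claim_ definition above) =====
theorem pass_text_filter_spec : Claim_equal_pass_text_filter := by
  intro text filter _
  unfold Spec_pass_text_filter
  rw [pvA_eq, pvB_eq]
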